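-- pv_equiv track=rewrite | github.com/hkzhugc/UnrealEngineSkills | ue-knowledge-init/scripts/generate_summaries.py | order_modules
-- ===== SOURCE A (Python) =====
-- TIERS = {
--     1: [
--         'Core', 'CoreUObject', 'Engine', 'RHI', 'RenderCore',
--         'Renderer', 'ApplicationCore', 'SlateCore', 'Slate', 'InputCore',
--     ],
--     2: [
--         'NavigationSystem', 'AIModule', 'PhysicsCore', 'Chaos',
--         'AnimationCore', 'AnimGraphRuntime', 'Landscape', 'Niagara',
--         'UMG', 'MovieScene',
--     ],
--     3: [
--         'UnrealEd', 'BlueprintGraph', 'Kismet', 'PropertyEditor',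
--         'GraphEditor', 'ContentBrowser', 'Sequencer', 'Persona',
--     ],
-- }
--
-- def order_modules(module_names: list, tier: int = None) -> list:
--     """Order modules by tier priority, then alphabetically."""
--     if tier is not None:
--         tier_modules = TIERS.get(tier, [])
--         return [m for m in tier_modules if m in module_names]
--
--     ordered = []
--     for t in sorted(TIERS.keys()):
--         for m in TIERS[t]:
--             if m in module_names and m not in ordered:
--                 ordered.append(m)
--
--     remaining = sorted(m for m in module_names if m not in ordered)
--     ordered.extend(remaining)
--     return ordered
-- ===== SOURCE B (Python) =====
-- TIERS = {
--     1: [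
--         'Core', 'CoreUObject', 'Engine', 'RHI', 'RenderCore',
--         'Renderer', 'ApplicationCore', 'SlateCore', 'Slate', 'InputCore',
--     ],
--     2: [
--         'NavigationSystem', 'AIModule', 'PhysicsCore', 'Chaos',
--         'AnimationCore', 'AnimGraphRuntime', 'Landscape', 'Niagara',
--         'UMG', 'MovieScene',
--     ],
--     3: [
--         'UnrealEd', 'BlueprintGraph', 'Kismet', 'PropertyEditor',
--         'GraphEditor', 'ContentBrowser', 'Sequencer', 'Persona',
--     ],
-- }
--
-- PRIORITY = [m for t in sorted(TIERS) for m in TIERS[t]]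
-- RANK = {m: i for i, m in enumerate(PRIORITY)}
--
-- def order_modules(module_names: list, tier: int = None) -> list:
--     """Order modules by tier priority, then alphabetically."""
--     if tier is not None:
--         names = set(module_names)
--         return [m for m in TIERS.get(tier, []) if m in names]
--
--     tier_bucket, others, seen = [], [], set()
--     for m in module_names:
--         if m in RANK:
--             if m not in seen:
--                 seen.add(m)
--                 tier_bucket.append(m)
--         else:
--             others.append(m)
--     tier_bucket.sort(key=RANK.__getitem__)
--     others.sort()
--     return tier_bucket + others
-- ===== Notes on version B (the rewrite author's own statement) =====
-- stated objective: alternative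
-- what changed: Instead of A's nested scans of the fixed TIERS structure with repeated membership tests in the input list and in the growing 'ordered' accumulator, B makes one indexed pass over module_names using a precomputed flat PRIORITY list and rank dict, bucketing tier modules (deduped via a seen-set) and others, then sorts the tier bucket by rank and the others alphabetically.
import Mathlib
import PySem

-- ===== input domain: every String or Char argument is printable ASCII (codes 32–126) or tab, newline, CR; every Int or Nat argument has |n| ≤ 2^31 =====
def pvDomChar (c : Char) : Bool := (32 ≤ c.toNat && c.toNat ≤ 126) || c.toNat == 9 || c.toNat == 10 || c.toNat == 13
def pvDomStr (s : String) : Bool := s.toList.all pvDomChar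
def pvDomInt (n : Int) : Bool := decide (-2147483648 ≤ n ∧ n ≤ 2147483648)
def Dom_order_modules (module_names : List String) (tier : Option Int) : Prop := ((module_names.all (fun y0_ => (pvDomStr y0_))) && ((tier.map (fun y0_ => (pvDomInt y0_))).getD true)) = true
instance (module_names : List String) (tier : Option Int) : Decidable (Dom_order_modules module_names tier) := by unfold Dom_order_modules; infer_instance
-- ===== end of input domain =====

-- B replaces A's repeated scans of the fixed TIERS structure by one indexed pass over the
-- input (rank dict + buckets + sort); objective: alternative decomposition, same result.

-- ===== PORT A =====
-- module-level constant TIERS, shared verbatim by both Python files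
def TIERS : PySem.Dict Int (List String) := PySem.Dict.ofList [
  (1, ["Core", "CoreUObject", "Engine", "RHI", "RenderCore",
       "Renderer", "ApplicationCore", "SlateCore", "Slate", "InputCore"]),
  (2, ["NavigationSystem", "AIModule", "PhysicsCore", "Chaos",
       "AnimationCore", "AnimGraphRuntime", "Landscape", "Niagara",
       "UMG", "MovieScene"]),
  (3, ["UnrealEd", "BlueprintGraph", "Kismet", "PropertyEditor",
       "GraphEditor", "ContentBrowser", "Sequencer", "Persona"])]

def order_modules (module_names : List String) (tier : Option Int) : List String :=
  match tier with
  | some t =>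
    -- TIERS.get(tier, [])
    ((TIERS.get? t).getD []).filter (fun m => decide (m ∈ module_names))
  | none =>
    let ordered := (PySem.List.sorted TIERS.keys (fun x => x) false).foldl
      (fun acc t =>
        -- TIERS[t]: t comes from TIERS' own keys, so the lookup never raises; getD [] is exact here
        ((TIERS.get? t).getD []).foldl
          (fun acc m => if m ∈ module_names ∧ m ∉ acc then acc ++ [m] else acc) acc) []
    let remaining := PySem.List.sorted
      (module_names.filter (fun m => decide (m ∉ ordered))) (fun x => x) false
    ordered ++ remaining

-- ===== PORT B =====
-- PRIORITY = [m for t in sorted(TIERS) for m in TIERS[t]]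
def PRIORITY : List String :=
  (PySem.List.sorted TIERS.keys (fun x => x) false).flatMap (fun t => (TIERS.get? t).getD [])

-- RANK = {m: i for i, m in enumerate(PRIORITY)}
def RANK : PySem.Dict String Int :=
  (PySem.List.enumerate PRIORITY 0).foldl (fun d p => d.insert p.2 p.1) PySem.Dict.empty

def order_modules_alt (module_names : List String) (tier : Option Int) : List String :=
  match tier with
  | some t =>
    let names := PySem.Set.ofList module_names
    ((TIERS.get? t).getD []).filter (fun m => decide (m ∈ names))
  | none =>
    let st := module_names.foldl
      (fun (st : List String × List String × PySem.Set String) m =>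
        if RANK.contains m then
          if m ∈ st.2.2 then st
          else (st.1 ++ [m], st.2.1, PySem.Set.add st.2.2 m)
        else (st.1, st.2.1 ++ [m], st.2.2))
      ([], [], PySem.Set.empty)
    -- sort key RANK[m]: every element of the bucket is a key of RANK, so getD 0 is exact here
    let tb := PySem.List.sorted st.1 (fun m => RANK.getD m 0) false
    let oth := PySem.List.sorted st.2.1 (fun x => x) false
    tb ++ oth

-- ===== PRECONDITION & SPEC =====
def Spec_order_modules (module_names : List String) (tier : Option Int) (out : List String) : Prop := out = order_modules_alt module_names tier
instance (module_names : List String) (tier : Option Int) (out : List String) : Decidable (Spec_order_modules module_names tier out) := by unfold Spec_order_modules; infer_instance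

-- ===== CLAIM (what is proved, stated in full; the proofs are below) =====
def Claim_equal_order_modules : Prop := ∀ (module_names : List String) (tier : Option Int), Dom_order_modules module_names tier → Spec_order_modules module_names tier (order_modules module_names tier)

-- ===== LEMMAS AND PROOFS =====

-- concrete facts about the fixed priority structure
set_option maxRecDepth 8192 in
lemma rank_keys : PySem.Dict.keys RANK = PRIORITY := by decide

set_option maxRecDepth 8192 in
lemma priority_nodup : PRIORITY.Nodup := by decide

set_option maxRecDepth 8192 in
lemma priority_pairwise_rank :
    PRIORITY.Pairwise (fun a b => RANK.getD a 0 < RANK.getD b 0) := by decide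

lemma rank_contains_iff (m : String) : RANK.contains m = true ↔ m ∈ PRIORITY := by
  rw [PySem.Dict.contains_iff_mem_keys, rank_keys]

-- A's dedup-append loop over a duplicate-free list is a filter
lemma loopA (P xs acc : List String) (hnd : P.Nodup) (hdis : ∀ m ∈ P, m ∉ acc) :
    P.foldl (fun acc m => if m ∈ xs ∧ m ∉ acc then acc ++ [m] else acc) acc
      = acc ++ P.filter (fun m => decide (m ∈ xs)) := by
  induction P generalizing acc with
  | nil => simp
  | cons p P ih =>
    have hp : p ∉ acc := hdis p (List.mem_cons_self)
    have hndP : P.Nodup := hnd.of_cons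
    have hpP : p ∉ P := (List.nodup_cons.mp hnd).1
    by_cases hmem : p ∈ xs
    · have hcond : (p ∈ xs ∧ p ∉ acc) := ⟨hmem, hp⟩
      simp only [List.foldl_cons, if_pos hcond]
      rw [ih (acc ++ [p]) hndP (by
        intro m hm
        simp only [List.mem_append, List.mem_singleton]
        rintro (h | rfl)
        · exact hdis m (List.mem_cons_of_mem _ hm) h
        · exact hpP hm)]
      simp [hmem]
    · have hcond : ¬ (p ∈ xs ∧ p ∉ acc) := fun h => hmem h.1
      simp only [List.foldl_cons, if_neg hcond]
      rw [ih acc hndP (fun m hm => hdis m (List.mem_cons_of_mem _ hm))]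
      simp [hmem]

-- A's nested loop over the tiers is the flat loop over PRIORITY
lemma orderedA_eq_foldl (xs : List String) :
    (PySem.List.sorted TIERS.keys (fun x => x) false).foldl
      (fun acc t => ((TIERS.get? t).getD []).foldl
        (fun acc m => if m ∈ xs ∧ m ∉ acc then acc ++ [m] else acc) acc) []
      = PRIORITY.foldl (fun acc m => if m ∈ xs ∧ m ∉ acc then acc ++ [m] else acc) [] := by
  have hk : PySem.List.sorted TIERS.keys (fun x => x) false = [1, 2, 3] := by decide
  rw [hk]
  show _ = ((PySem.List.sorted TIERS.keys (fun x => x) false).flatMap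
      (fun t => (TIERS.get? t).getD [])).foldl _ []
  rw [hk]
  simp only [List.flatMap_cons, List.flatMap_nil, List.append_nil,
    List.foldl_cons, List.foldl_nil, List.foldl_append]

-- invariant of B's single bucketing pass
lemma loopB (xs : List String) :
    ∀ (tb oth seen : List String), (∀ m, m ∈ seen ↔ m ∈ tb) → tb.Nodup →
    (let r := xs.foldl
        (fun (st : List String × List String × PySem.Set String) m =>
          if RANK.contains m then
            if m ∈ st.2.2 then st
            else (st.1 ++ [m], st.2.1, PySem.Set.add st.2.2 m)
          else (st.1, st.2.1 ++ [m], st.2.2))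
        (tb, oth, seen)
     r.1.Nodup ∧ (∀ m, m ∈ r.1 ↔ m ∈ tb ∨ (m ∈ xs ∧ RANK.contains m = true))
       ∧ r.2.1 = oth ++ xs.filter (fun m => !RANK.contains m)) := by
  induction xs with
  | nil => intro tb oth seen hseen hnd; exact ⟨hnd, by simp, by simp⟩
  | cons x xs ih =>
    intro tb oth seen hseen hnd
    simp only [List.foldl_cons]
    cases hc : RANK.contains x with
    | true =>
      by_cases hx : x ∈ seen
      · rw [if_pos rfl, if_pos hx]
        obtain ⟨h1, h2, h3⟩ := ih tb oth seen hseen hnd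
        refine ⟨h1, fun m => ?_, by simpa [List.filter_cons, hc] using h3⟩
        have hxtb' : x ∈ tb := (hseen x).mp hx
        rw [h2 m]
        simp only [List.mem_cons]
        constructor
        · tauto
        · rintro (h | ⟨h | h, hcm⟩)
          · tauto
          · subst h; tauto
          · tauto
      · have hxtb : x ∉ tb := fun h => hx ((hseen x).mpr h)
        rw [if_pos rfl, if_neg hx]
        obtain ⟨h1, h2, h3⟩ := ih (tb ++ [x]) oth (PySem.Set.add seen x)
          (by intro m
              rw [PySem.Set.mem_add, List.mem_append, List.mem_singleton, hseen m])
          (by simp [List.nodup_append, hnd]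
              exact fun a ha h => hxtb (h ▸ ha))
        refine ⟨h1, fun m => ?_, by simpa [List.filter_cons, hc] using h3⟩
        rw [h2 m]
        simp only [List.mem_append, List.mem_cons, List.not_mem_nil, or_false]
        constructor
        · rintro ((h | h) | ⟨h, hcm⟩)
          · tauto
          · subst h; tauto
          · tauto
        · rintro (h | ⟨h | h, hcm⟩)
          · tauto
          · subst h; tauto
          · tauto
    | false =>
      rw [if_neg (by simp)]
      obtain ⟨h1, h2, h3⟩ := ih tb (oth ++ [x]) seen hseen hnd
      refine ⟨h1, fun m => ?_, by simp [hc, h3]⟩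
      rw [h2 m]
      simp only [List.mem_cons]
      constructor
      · tauto
      · rintro (h | ⟨h | h, hcm⟩)
        · tauto
        · subst h; simp_all
        · tauto

-- ===== VERDICT (by name: the statement is the Claim_ definition above) =====
theorem order_modules_spec : Claim_equal_order_modules := by
  intro xs tier _
  unfold Spec_order_modules order_modules order_modules_alt
  cases tier with
  | some t =>
    simp only
    exact List.filter_congr fun m _ => by simp [PySem.Set.mem_ofList]
  | none =>
    simp only
    obtain ⟨hTnd, hTmem, hO⟩ := loopB xs [] [] PySem.Set.empty (by simp [PySem.Set.empty])
      List.nodup_nil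
    set r := xs.foldl
        (fun (st : List String × List String × PySem.Set String) m =>
          if RANK.contains m then
            if m ∈ st.2.2 then st
            else (st.1 ++ [m], st.2.1, PySem.Set.add st.2.2 m)
          else (st.1, st.2.1 ++ [m], st.2.2))
        ([], [], PySem.Set.empty) with hr
    have hordered : (PySem.List.sorted TIERS.keys (fun x => x) false).foldl
        (fun acc t => ((TIERS.get? t).getD []).foldl
          (fun acc m => if m ∈ xs ∧ m ∉ acc then acc ++ [m] else acc) acc) []
        = PRIORITY.filter (fun m => decide (m ∈ xs)) := by
      rw [orderedA_eq_foldl, loopA PRIORITY xs [] priority_nodup (by simp)]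
      simp
    have hFmem : ∀ m, m ∈ PRIORITY.filter (fun m => decide (m ∈ xs)) ↔ m ∈ r.1 := by
      intro m
      rw [hTmem m, List.mem_filter]
      simp only [List.not_mem_nil, false_or, decide_eq_true_eq, rank_contains_iff]
      tauto
    have hsortT : PySem.List.sorted r.1 (fun m => RANK.getD m 0) false
        = PRIORITY.filter (fun m => decide (m ∈ xs)) := by
      apply PySem.List.sorted_eq_of_perm_of_pairwise_lt
      · exact (List.perm_ext_iff_of_nodup (priority_nodup.filter _) hTnd).mpr hFmem
      · exact List.Pairwise.sublist List.filter_sublist priority_pairwise_rank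
    rw [hordered, hsortT]
    refine congrArg _ ?_
    refine congrArg (fun l => PySem.List.sorted l (fun x => x) false) ?_
    rw [hO]
    simp only [List.nil_append]
    refine List.filter_congr fun m hm => ?_
    have h1 : m ∈ PRIORITY.filter (fun m => decide (m ∈ xs)) ↔ RANK.contains m = true := by
      simp [List.mem_filter, hm, rank_contains_iff]
    cases hc : RANK.contains m with
    | true => simp [h1.mpr hc]
    | false =>
      have hnot : m ∉ PRIORITY.filter (fun m => decide (m ∈ xs)) :=
        fun hmem => by simp [h1.mp hmem] at hc
      simp [hnot]
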